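-- pv_equiv track=rewrite | github.com/kamalkish0r/problem-solving | OA/Cisco/is_this_a_tree_uk_collab_version_python.py | duplicate_edges
-- ===== SOURCE A (Python) =====
-- def duplicate_edges(child_of) -> bool:
-- 	for parent, children in child_of.items():
-- 		if (len(children) == 2 and children[0] == children[1]):
-- 			return True
-- 		for child in children:
-- 			if child in child_of.keys() and parent in child_of[child]:
-- 				return True
--
-- 	return False
-- ===== SOURCE B (Python) =====
-- def duplicate_edges(child_of) -> bool:
--     # Single pass with an accumulator: remember every directed edge already
--     # traversed; a back-edge exists iff some edge's reverse was seen earlier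
--     # (self-loops are their own reverse, caught by parent == child).
--     seen = set()
--     for parent, children in child_of.items():
--         if len(children) == 2 and children[0] == children[1]:
--             return True
--         for child in children:
--             if parent == child or (child, parent) in seen:
--                 return True
--             seen.add((parent, child))
--     return False
-- ===== Notes on version B (the rewrite author's own statement) =====
-- stated objective: alternative
-- what changed: Replaces A's stateless per-child dict-key lookup plus list-membership rescan by a single stateful pass that accumulates the set of edges traversed so far and fires when an edge's reverse is already in that history (self-loops via parent == child), so no dict lookup or child-list scan remains.
import Mathlib
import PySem

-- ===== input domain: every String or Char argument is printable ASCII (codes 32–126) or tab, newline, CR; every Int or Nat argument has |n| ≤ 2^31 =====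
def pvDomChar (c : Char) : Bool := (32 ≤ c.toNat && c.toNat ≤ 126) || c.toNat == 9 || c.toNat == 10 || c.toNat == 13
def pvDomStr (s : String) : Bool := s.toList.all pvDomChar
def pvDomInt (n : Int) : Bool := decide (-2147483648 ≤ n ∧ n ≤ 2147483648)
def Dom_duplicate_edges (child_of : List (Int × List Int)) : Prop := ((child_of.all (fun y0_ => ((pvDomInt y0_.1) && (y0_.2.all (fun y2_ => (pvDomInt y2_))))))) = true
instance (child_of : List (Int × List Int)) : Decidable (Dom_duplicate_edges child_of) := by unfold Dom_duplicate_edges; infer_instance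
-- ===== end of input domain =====

-- B replaces A's stateless per-child dict lookup + list-membership rescan by a single pass that
-- accumulates a set of edges seen so far and fires when an edge's reverse is in that history
-- (self-loops via parent == child) (objective: alternative).


-- ===== PORT A =====
-- inner loop: `for child in children: if child in child_of.keys() and parent in child_of[child]: return True`
def dupA_inner (child_of : List (Int × List Int)) (parent : Int) : List Int → Bool
  | [] => false
  | c :: cs =>
    match child_of.lookup c with
    | some l => if l.contains parent then true else dupA_inner child_of parent cs
    | none => dupA_inner child_of parent cs

-- outer loop over child_of.items() with the two early returns
def dupA_outer (child_of : List (Int × List Int)) : List (Int × List Int) → Bool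
  | [] => false
  | (p, cs) :: rest =>
    if cs.length == 2 && PySem.List.pyGet? cs 0 == PySem.List.pyGet? cs 1 then true
    else if dupA_inner child_of p cs then true
    else dupA_outer child_of rest

def duplicate_edges (child_of : List (Int × List Int)) : Bool :=
  dupA_outer child_of child_of

-- ===== PORT B =====
-- inner loop: `for child in children: if parent == child or (child, parent) in seen: return True; seen.add((parent, child))`
def dupB_inner (parent : Int) : List Int → PySem.Set (Int × Int) → Bool × PySem.Set (Int × Int)
  | [], seen => (false, seen)
  | c :: cs, seen =>
    if parent == c || seen.contains (c, parent) then (true, seen)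
    else dupB_inner parent cs (PySem.Set.add seen (parent, c))

-- outer loop carrying the accumulated `seen` set of traversed edges
def dupB_outer : List (Int × List Int) → PySem.Set (Int × Int) → Bool
  | [], _ => false
  | (p, cs) :: rest, seen =>
    if cs.length == 2 && PySem.List.pyGet? cs 0 == PySem.List.pyGet? cs 1 then true
    else
      match dupB_inner p cs seen with
      | (true, _) => true
      | (false, seen') => dupB_outer rest seen'

def duplicate_edges_alt (child_of : List (Int × List Int)) : Bool :=
  dupB_outer child_of PySem.Set.empty

-- ===== PRECONDITION & SPEC =====
-- The Python argument is a dict, whose keys are unique; Pre_ restricts the association-list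
-- representation to genuine dicts (no duplicate keys). It excludes no Python input of A.
def Pre_duplicate_edges (child_of : List (Int × List Int)) : Prop :=
  (child_of.map Prod.fst).Nodup
instance (child_of : List (Int × List Int)) : Decidable (Pre_duplicate_edges child_of) := by
  unfold Pre_duplicate_edges; infer_instance
def pvWitness_duplicate_edges : (List (Int × List Int)) := [(0, [1, 2]), (1, [0]), (2, [])]
def Spec_duplicate_edges (child_of : List (Int × List Int)) (out : Bool) : Prop := out = duplicate_edges_alt child_of
instance (child_of : List (Int × List Int)) (out : Bool) : Decidable (Spec_duplicate_edges child_of out) := by unfold Spec_duplicate_edges; infer_instance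

-- ===== CLAIM (what is proved, stated in full; the proofs are below) =====
def Claim_equal_duplicate_edges : Prop := ∀ (child_of : List (Int × List Int)), Dom_duplicate_edges child_of → Pre_duplicate_edges child_of → Spec_duplicate_edges child_of (duplicate_edges child_of)

-- ===== LEMMAS AND PROOFS =====

-- the duplicate-pair test, shared shape on both sides
def dupPair (cs : List Int) : Bool :=
  cs.length == 2 && PySem.List.pyGet? cs 0 == PySem.List.pyGet? cs 1

-- a back edge at (p, c): c is a key and p is among c's children (first-match lookup)
def backL (child_of : List (Int × List Int)) (p c : Int) : Prop :=
  ∃ l, child_of.lookup c = some l ∧ p ∈ l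

-- the full directed edge list
def edgesOf (L : List (Int × List Int)) : List (Int × Int) :=
  L.flatMap (fun pc => pc.2.map (fun c => (pc.1, c)))

-- proof-side view of B's traversal over a flat edge list
def scanE : List (Int × Int) → PySem.Set (Int × Int) → Bool × PySem.Set (Int × Int)
  | [], s => (false, s)
  | (u, v) :: es, s =>
    if u == v || s.contains (v, u) then (true, s)
    else scanE es (PySem.Set.add s (u, v))

theorem dupA_inner_eq_true (child_of : List (Int × List Int)) (p : Int) (cs : List Int) :
    dupA_inner child_of p cs = true ↔ ∃ c ∈ cs, backL child_of p c := by
  induction cs with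
  | nil => simp [dupA_inner]
  | cons c cs ih =>
    simp only [dupA_inner, List.mem_cons]
    cases h : child_of.lookup c with
    | none =>
      simp only [ih]
      constructor
      · rintro ⟨x, hx, hb⟩; exact ⟨x, Or.inr hx, hb⟩
      · rintro ⟨x, hx | hx, hb⟩
        · subst hx; obtain ⟨l, hl, _⟩ := hb; rw [h] at hl; cases hl
        · exact ⟨x, hx, hb⟩
    | some l =>
      cases hp : l.contains p with
      | true =>
        simp only [hp, if_true]
        have hpm : p ∈ l := by simpa using hp
        exact ⟨fun _ => ⟨c, Or.inl rfl, l, h, hpm⟩, fun _ => trivial⟩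
      | false =>
        have hpn : p ∉ l := by simpa using hp
        simp only [hp, Bool.false_eq_true, if_false, ih]
        constructor
        · rintro ⟨x, hx, hb⟩; exact ⟨x, Or.inr hx, hb⟩
        · rintro ⟨x, hx | hx, hb⟩
          · subst hx; obtain ⟨l', hl', hp'⟩ := hb
            rw [h] at hl'; cases hl'; exact absurd hp' hpn
          · exact ⟨x, hx, hb⟩

theorem dupA_outer_eq_true (child_of M : List (Int × List Int)) :
    dupA_outer child_of M = true ↔
      ∃ pc ∈ M, dupPair pc.2 = true ∨ ∃ c ∈ pc.2, backL child_of pc.1 c := by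
  induction M with
  | nil => simp [dupA_outer]
  | cons pc rest ih =>
    obtain ⟨p, cs⟩ := pc
    simp only [dupA_outer, List.mem_cons]
    cases hd : dupPair cs with
    | true =>
      simp only [dupPair] at hd
      simp only [hd, if_true]
      exact ⟨fun _ => ⟨(p, cs), Or.inl rfl, Or.inl (by simp [dupPair, hd])⟩, fun _ => trivial⟩
    | false =>
      have hd' : (cs.length == 2 && PySem.List.pyGet? cs 0 == PySem.List.pyGet? cs 1) = false := by
        simpa [dupPair] using hd
      simp only [hd', Bool.false_eq_true, if_false]
      cases hi : dupA_inner child_of p cs with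
      | true =>
        simp only [if_true]
        refine ⟨fun _ => ⟨(p, cs), Or.inl rfl, Or.inr ?_⟩, fun _ => trivial⟩
        exact (dupA_inner_eq_true child_of p cs).mp hi
      | false =>
        simp only [Bool.false_eq_true, if_false, ih]
        constructor
        · rintro ⟨x, hx, hb⟩; exact ⟨x, Or.inr hx, hb⟩
        · rintro ⟨x, hx | hx, hb⟩
          · subst hx
            rcases hb with hb | hb
            · rw [hb] at hd; cases hd
            · rw [(dupA_inner_eq_true child_of p cs).mpr hb] at hi; cases hi
          · exact ⟨x, hx, hb⟩

-- first-match lookup coincides with membership when keys are unique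
theorem lookup_eq_some_iff_mem (L : List (Int × List Int)) (hnd : (L.map Prod.fst).Nodup)
    (c : Int) (l : List Int) : L.lookup c = some l ↔ (c, l) ∈ L := by
  induction L with
  | nil => simp
  | cons kv rest ih =>
    obtain ⟨k, v⟩ := kv
    simp only [List.map_cons, List.nodup_cons] at hnd
    simp only [List.lookup, List.mem_cons]
    cases hk : (c == k) with
    | true =>
      have hkc : c = k := by simpa using hk
      subst hkc
      constructor
      · intro h; exact Or.inl (by rw [Option.some.inj h])
      · rintro (h | hmem)
        · injection h with _ h2; rw [h2]
        · exact absurd (List.mem_map_of_mem (f := Prod.fst) hmem) hnd.1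
    | false =>
      simp only [ih hnd.2]
      have hkc : c ≠ k := by simpa using hk
      constructor
      · exact Or.inr
      · rintro (h | h)
        · exact absurd (congrArg Prod.fst h) hkc
        · exact h

-- membership of a directed edge in the edge list
theorem mem_edges (L : List (Int × List Int)) (u v : Int) :
    (u, v) ∈ edgesOf L ↔ ∃ l, (u, l) ∈ L ∧ v ∈ l := by
  simp only [edgesOf, List.mem_flatMap, List.mem_map, Prod.mk.injEq]
  constructor
  · rintro ⟨⟨p, l⟩, hm, c, hc, rfl, rfl⟩; exact ⟨l, hm, hc⟩
  · rintro ⟨l, hm, hv⟩; exact ⟨(u, l), hm, v, hv, rfl, rfl⟩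

-- B's inner loop is the flat scan over this parent's edges
theorem dupB_inner_eq_scanE (p : Int) (cs : List Int) (s : PySem.Set (Int × Int)) :
    dupB_inner p cs s = scanE (cs.map (fun c => (p, c))) s := by
  induction cs generalizing s with
  | nil => rfl
  | cons c cs ih => simp only [dupB_inner, List.map_cons, scanE, ih]

-- the key characterisation of the history scan
theorem scanE_fst_eq_true (es : List (Int × Int)) (s : PySem.Set (Int × Int)) :
    (scanE es s).1 = true ↔
      ∃ u v, (u, v) ∈ es ∧ (u = v ∨ (v, u) ∈ s ∨ (v, u) ∈ es) := by
  induction es generalizing s with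
  | nil => simp [scanE]
  | cons e es ih =>
    obtain ⟨a, b⟩ := e
    simp only [scanE]
    cases hc : (a == b || PySem.Set.contains s (b, a)) with
    | true =>
      simp only [if_true, true_iff]
      rcases Bool.or_eq_true_iff.mp hc with h | h
      · exact ⟨a, b, List.mem_cons_self, Or.inl (by simpa using h)⟩
      · exact ⟨a, b, List.mem_cons_self, Or.inr (Or.inl ((PySem.Set.contains_iff _ _).mp h))⟩
    | false =>
      have hab : ¬ a = b := by
        intro h; subst h; simp at hc
      have hsa : (b, a) ∉ s := by
        intro h
        rw [(Bool.or_eq_true_iff).mpr (Or.inr ((PySem.Set.contains_iff _ _).mpr h))] at hc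
        cases hc
      simp only [Bool.false_eq_true, if_false, ih]
      constructor
      · rintro ⟨u, v, hm, hcond⟩
        refine ⟨u, v, List.mem_cons_of_mem _ hm, ?_⟩
        rcases hcond with h | h | h
        · exact Or.inl h
        · rw [PySem.Set.mem_add] at h
          rcases h with h | h
          · exact Or.inr (Or.inl h)
          · exact Or.inr (Or.inr (by rw [h]; exact List.mem_cons_self))
        · exact Or.inr (Or.inr (List.mem_cons_of_mem _ h))
      · rintro ⟨u, v, hm, hcond⟩
        rcases List.mem_cons.mp hm with he | hm'
        · -- (u,v) = (a,b): the only live case is (v,u) ∈ es (reverse later); fire there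
          injection he with h1 h2; subst h1; subst h2
          rcases hcond with h | h | h
          · exact absurd h hab
          · exact absurd h hsa
          · rcases List.mem_cons.mp h with he2 | h'
            · exact absurd (congrArg Prod.fst he2).symm hab
            · exact ⟨v, u, h', Or.inr (Or.inl ((PySem.Set.mem_add _ _ _).mpr (Or.inr rfl)))⟩
        · refine ⟨u, v, hm', ?_⟩
          rcases hcond with h | h | h
          · exact Or.inl h
          · exact Or.inr (Or.inl ((PySem.Set.mem_add _ _ _).mpr (Or.inl h)))
          · rcases List.mem_cons.mp h with he2 | h'
            · exact Or.inr (Or.inl ((PySem.Set.mem_add _ _ _).mpr (Or.inr he2)))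
            · exact Or.inr (Or.inr h')

-- append law for the scan
theorem scanE_append (l1 l2 : List (Int × Int)) (s : PySem.Set (Int × Int)) :
    scanE (l1 ++ l2) s =
      if (scanE l1 s).1 then scanE l1 s else scanE l2 (scanE l1 s).2 := by
  induction l1 generalizing s with
  | nil => simp [scanE]
  | cons e l1 ih =>
    obtain ⟨a, b⟩ := e
    simp only [List.cons_append, scanE]
    cases hc : (a == b || PySem.Set.contains s (b, a)) with
    | true => simp
    | false => simp only [Bool.false_eq_true, if_false]; exact ih _

-- B's outer loop = dup-pair somewhere, or the flat scan of all remaining edges fires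
theorem dupB_outer_eq_true (M : List (Int × List Int)) (s : PySem.Set (Int × Int)) :
    dupB_outer M s = true ↔
      (∃ pc ∈ M, dupPair pc.2 = true) ∨ (scanE (edgesOf M) s).1 = true := by
  induction M generalizing s with
  | nil => simp [dupB_outer, edgesOf, scanE]
  | cons pc rest ih =>
    obtain ⟨p, cs⟩ := pc
    have hedges : edgesOf ((p, cs) :: rest) = cs.map (fun c => (p, c)) ++ edgesOf rest := by
      simp [edgesOf]
    simp only [dupB_outer, List.mem_cons, hedges, scanE_append]
    cases hd : dupPair cs with
    | true =>
      simp only [dupPair] at hd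
      simp only [hd, if_true, true_iff]
      exact Or.inl ⟨(p, cs), Or.inl rfl, by simp [dupPair, hd]⟩
    | false =>
      have hd' : (cs.length == 2 && PySem.List.pyGet? cs 0 == PySem.List.pyGet? cs 1) = false := by
        simpa [dupPair] using hd
      simp only [hd', Bool.false_eq_true, if_false, dupB_inner_eq_scanE]
      cases hi : (scanE (cs.map (fun c => (p, c))) s).1 with
      | true =>
        have : scanE (cs.map (fun c => (p, c))) s = (true, (scanE (cs.map (fun c => (p, c))) s).2) := by
          rw [← hi]
        rw [this]
        simp
      | false =>
        have : scanE (cs.map (fun c => (p, c))) s = (false, (scanE (cs.map (fun c => (p, c))) s).2) := by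
          rw [← hi]
        rw [this]
        simp only [Bool.false_eq_true, if_false, ih]
        constructor
        · rintro (⟨x, hx, hb⟩ | h)
          · exact Or.inl ⟨x, Or.inr hx, hb⟩
          · exact Or.inr h
        · rintro (⟨x, hx | hx, hb⟩ | h)
          · subst hx; rw [hb] at hd; cases hd
          · exact Or.inl ⟨x, hx, hb⟩
          · exact Or.inr h

-- the empty-history scan fires iff the edge list contains an edge together with its reverse
theorem scanE_empty_iff (es : List (Int × Int)) :
    (scanE es PySem.Set.empty).1 = true ↔ ∃ u v, (u, v) ∈ es ∧ (v, u) ∈ es := by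
  rw [scanE_fst_eq_true]
  constructor
  · rintro ⟨u, v, hm, h | h | h⟩
    · exact ⟨u, v, hm, by rw [h] at hm ⊢; exact hm⟩
    · cases h
    · exact ⟨u, v, hm, h⟩
  · rintro ⟨u, v, h1, h2⟩
    exact ⟨u, v, h1, Or.inr (Or.inr h2)⟩

-- ===== VERDICT (by name: the statement is the Claim_ definition above) =====
theorem duplicate_edges_spec : Claim_equal_duplicate_edges := by
  intro L _ hpre
  unfold Spec_duplicate_edges
  have ha := dupA_outer_eq_true L L
  have hb : duplicate_edges_alt L = true ↔
      (∃ pc ∈ L, dupPair pc.2 = true) ∨ ∃ u v, (u, v) ∈ edgesOf L ∧ (v, u) ∈ edgesOf L := by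
    unfold duplicate_edges_alt
    rw [dupB_outer_eq_true, scanE_empty_iff]
  rcases hA : duplicate_edges L with _ | _ <;>
  rcases hB : duplicate_edges_alt L with _ | _
  · rfl
  · exfalso
    rcases hb.mp hB with ⟨pc, hm, hp⟩ | ⟨u, v, h1, h2⟩
    · have : dupA_outer L L = true := (dupA_outer_eq_true L L).mpr ⟨pc, hm, Or.inl hp⟩
      rw [duplicate_edges] at hA; rw [this] at hA; cases hA
    · obtain ⟨l1, hm1, hv1⟩ := (mem_edges L u v).mp h1
      obtain ⟨l2, hm2, hu2⟩ := (mem_edges L v u).mp h2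
      have hback : backL L u v :=
        ⟨l2, (lookup_eq_some_iff_mem L hpre v l2).mpr hm2, hu2⟩
      have : dupA_outer L L = true :=
        (dupA_outer_eq_true L L).mpr ⟨(u, l1), hm1, Or.inr ⟨v, hv1, hback⟩⟩
      rw [duplicate_edges] at hA; rw [this] at hA; cases hA
  · exfalso
    rw [duplicate_edges] at hA
    rcases ha.mp hA with ⟨⟨p, cs⟩, hm, hp | ⟨c, hc, l, hl, hpl⟩⟩
    · have : duplicate_edges_alt L = true := hb.mpr (Or.inl ⟨(p, cs), hm, hp⟩)
      rw [this] at hB; cases hB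
    · have hmem : (c, l) ∈ L := (lookup_eq_some_iff_mem L hpre c l).mp hl
      have : duplicate_edges_alt L = true :=
        hb.mpr (Or.inr ⟨p, c, (mem_edges L p c).mpr ⟨cs, hm, hc⟩,
          (mem_edges L c p).mpr ⟨l, hmem, hpl⟩⟩)
      rw [this] at hB; cases hB
  · rfl
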